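-- pv_equiv track=rewrite | github.com/valllabh/web-exposure-detection | scripts/calculate-criticality-rules.py | has_payment_keywords
-- ===== SOURCE A (Python) =====
-- def has_payment_keywords(html: str) -> bool:
--     """Check for payment/commerce keywords"""
--     if not html:
--         return False
--
--     html_lower = html.lower()
--     payment_keywords = [
--         'checkout', 'payment', 'pay now', 'billing',
--         'credit card', 'cvv', 'card number',
--     ]
--
--     return any(keyword in html_lower for keyword in payment_keywords)
-- ===== SOURCE B (Python) =====
-- _PAYMENT_KEYWORDS = (
--     'checkout', 'payment', 'pay now', 'billing',
--     'credit card', 'cvv', 'card number',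
-- )
--
--
-- def has_payment_keywords(html: str) -> bool:
--     """Check for payment/commerce keywords"""
--     if not html:
--         return False
--     n = len(html)
--     for i in range(n):
--         for kw in _PAYMENT_KEYWORDS:
--             if n - i >= len(kw) and all(html[i + j].lower() == kw[j] for j in range(len(kw))):
--                 return True
--     return False
-- ===== Notes on version B (the rewrite author's own statement) =====
-- stated objective: alternative
-- what changed: B makes a single left-to-right scan over the original string, matching every keyword char-by-char case-insensitively at each position, instead of building a lowered copy of the whole string and running seven separate substring searches over it.
import Mathlib
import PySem

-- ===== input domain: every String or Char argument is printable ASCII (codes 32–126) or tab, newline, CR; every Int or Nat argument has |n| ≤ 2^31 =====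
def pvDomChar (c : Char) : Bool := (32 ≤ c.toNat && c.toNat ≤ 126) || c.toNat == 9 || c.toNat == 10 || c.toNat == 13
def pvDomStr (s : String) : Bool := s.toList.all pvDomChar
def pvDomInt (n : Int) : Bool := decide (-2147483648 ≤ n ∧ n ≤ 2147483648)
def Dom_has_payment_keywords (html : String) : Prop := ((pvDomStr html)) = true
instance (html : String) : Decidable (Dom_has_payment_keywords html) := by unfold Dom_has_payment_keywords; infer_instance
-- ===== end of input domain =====

-- B replaces A's lower-the-whole-string-then-seven-substring-searches with one
-- left-to-right scan matching each keyword char-by-char case-insensitively (alternative decomposition, same cost).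

-- ===== PORT A =====
def has_payment_keywords (html : String) : Bool :=
  if PySem.Str.len html == 0 then false
  else
    let html_lower := PySem.Str.lower html
    (["checkout", "payment", "pay now", "billing",
      "credit card", "cvv", "card number"] : List String).any
      (fun keyword => PySem.Str.isIn keyword html_lower)

-- ===== PORT B =====
def pvPaymentKeywords : List (List Char) :=
  ["checkout".toList, "payment".toList, "pay now".toList, "billing".toList,
   "credit card".toList, "cvv".toList, "card number".toList]

-- 'all(html[i+j].lower() == kw[j] …)' guarded by the length check: false when the string runs out
def pvMatchAt : List Char → List Char → Bool
  | [], _ => true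
  | _ :: _, [] => false
  | k :: ks, c :: cs => (PySem.Chars.lowerChar c == k) && pvMatchAt ks cs

-- 'for i in range(n)' as recursion over the suffixes of the string
def pvScan : List Char → Bool
  | [] => false
  | c :: rest => pvPaymentKeywords.any (fun kw => pvMatchAt kw (c :: rest)) || pvScan rest

def has_payment_keywords_alt (html : String) : Bool :=
  if PySem.Str.len html == 0 then false
  else pvScan html.toList

-- ===== PRECONDITION & SPEC =====
def Spec_has_payment_keywords (html : String) (out : Bool) : Prop := out = has_payment_keywords_alt html
instance (html : String) (out : Bool) : Decidable (Spec_has_payment_keywords html out) := by unfold Spec_has_payment_keywords; infer_instance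

-- ===== CLAIM (what is proved, stated in full; the proofs are below) =====
def Claim_equal_has_payment_keywords : Prop := ∀ (html : String), Dom_has_payment_keywords html → Spec_has_payment_keywords html (has_payment_keywords html)

-- ===== LEMMAS AND PROOFS =====

theorem pv_lower_cons (c : Char) (cs : List Char) :
    PySem.Chars.lower (c :: cs) = PySem.Chars.lowerChar c :: PySem.Chars.lower cs := rfl

theorem pvMatchAt_iff (kw s : List Char) :
    pvMatchAt kw s = true ↔ kw <+: PySem.Chars.lower s := by
  induction kw generalizing s with
  | nil => simp [pvMatchAt]
  | cons k ks ih =>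
    cases s with
    | nil => simp [pvMatchAt, PySem.Chars.lower]
    | cons c cs =>
      rw [pv_lower_cons]
      simp only [pvMatchAt, Bool.and_eq_true, beq_iff_eq, ih, List.cons_prefix_cons]
      exact and_congr_left' eq_comm

theorem pvScan_iff (s : List Char) :
    pvScan s = true ↔ ∃ kw ∈ pvPaymentKeywords, kw <:+: PySem.Chars.lower s := by
  induction s with
  | nil =>
    simp only [pvScan, Bool.false_eq_true, false_iff]
    rintro ⟨kw, hkw, hinf⟩
    have : kw = [] := List.sublist_nil.mp hinf.sublist
    subst this
    revert hkw; decide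
  | cons c cs ih =>
    simp only [pvScan, Bool.or_eq_true, List.any_eq_true, ih, pvMatchAt_iff, pv_lower_cons,
      List.infix_cons_iff]
    constructor
    · rintro (⟨kw, hkw, hp⟩ | ⟨kw, hkw, hi⟩)
      · exact ⟨kw, hkw, Or.inl hp⟩
      · exact ⟨kw, hkw, Or.inr hi⟩
    · rintro ⟨kw, hkw, hp | hi⟩
      · exact Or.inl ⟨kw, hkw, hp⟩
      · exact Or.inr ⟨kw, hkw, hi⟩

-- ===== VERDICT (by name: the statement is the Claim_ definition above) =====
theorem has_payment_keywords_spec : Claim_equal_has_payment_keywords := by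
  intro html _
  unfold Spec_has_payment_keywords has_payment_keywords has_payment_keywords_alt
  split
  · rfl
  · rw [Bool.eq_iff_iff, pvScan_iff]
    simp only [List.any_eq_true, PySem.Str.isIn_iff_infix, PySem.Str.toList_lower,
      pvPaymentKeywords, List.mem_cons, List.not_mem_nil, or_false]
    constructor
    · rintro ⟨kw, hkw, h⟩
      rcases hkw with rfl | rfl | rfl | rfl | rfl | rfl | rfl <;>
        exact ⟨_, by simp, h⟩
    · rintro ⟨kw, hkw, h⟩
      rcases hkw with rfl | rfl | rfl | rfl | rfl | rfl | rfl <;>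
        exact ⟨_, by simp, h⟩
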